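-- pv_equiv track=rewrite | github.com/IlariaPilo/accel-align-rmi | utilities/binary_print.py | recover_substring
-- ===== SOURCE A (Python) =====
-- def recover_substring(int_substring, l):
--     mask_b = 3
--     substring = ''
--     for _ in range(l):
--         basis = ''
--         value = (int_substring & mask_b)
--         if value == 0:
--             basis = 'A'
--         elif value == 1:
--             basis = 'C'
--         elif value == 2:
--             basis = 'G'
--         elif value == 3:
--             basis = 'T'
--         substring = basis + substring
--         int_substring = int_substring >> 2
--     return substring
-- ===== SOURCE B (Python) =====
-- def recover_substring(int_substring, l):
--     # Decode via the binary text rendering: isolate the low 2*l bits (Python's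
--     # & with a nonnegative mask yields them also for negative input), format
--     # them as a zero-padded bit string, then walk that string front to back
--     # (most significant pair first) two characters at a time through a pair table.
--     if l <= 0:
--         return ''
--     bits = format(int_substring & ((1 << (2 * l)) - 1), '0{}b'.format(2 * l))
--     pair = {'00': 'A', '01': 'C', '10': 'G', '11': 'T'}
--     out = []
--     i = 0
--     while i < len(bits):
--         out.append(pair[bits[i] + bits[i + 1]])
--         i += 2
--     return ''.join(out)
-- ===== Notes on version B (the rewrite author's own statement) =====
-- stated objective: faster
-- what changed: B masks the low 2*l bits once, renders them as one zero-padded binary text string, and decodes that string front-to-back two characters at a time through a '00'..'11' -> 'ACGT' pair table, instead of A's l-step mask/shift big-integer loop that prepends to a growing string.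
import Mathlib
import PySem

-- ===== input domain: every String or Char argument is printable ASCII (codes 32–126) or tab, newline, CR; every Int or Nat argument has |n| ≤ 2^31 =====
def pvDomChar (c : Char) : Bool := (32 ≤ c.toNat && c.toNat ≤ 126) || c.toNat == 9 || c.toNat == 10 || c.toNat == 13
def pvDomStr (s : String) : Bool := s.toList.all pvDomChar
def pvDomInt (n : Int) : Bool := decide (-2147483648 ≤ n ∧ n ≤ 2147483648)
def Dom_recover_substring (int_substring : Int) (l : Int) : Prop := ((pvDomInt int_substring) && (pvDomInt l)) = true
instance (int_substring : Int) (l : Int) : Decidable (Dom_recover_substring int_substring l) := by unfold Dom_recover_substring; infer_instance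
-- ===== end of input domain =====

-- B replaces A's l-step mask/shift integer loop with string prepending by one
-- masking of the low 2*l bits, one binary text rendering of that value, and a
-- front-to-back consumption of the bit string two characters at a time through
-- a '00'..'11' -> 'ACGT' pair table (objective: alternative decoding strategy).

-- ===== PORT A =====
-- loop body of A's 'for _ in range(l)': state = (substring as List Char, int_substring)
def pvStepA (st : List Char × Int) (_ : Int) : List Char × Int :=
  let value := PySem.Int.band st.2 3          -- int_substring & mask_b  (mask_b = 3)
  let basis : List Char :=
    if value = 0 then ['A'] else if value = 1 then ['C']
    else if value = 2 then ['G'] else if value = 3 then ['T'] else []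
  (basis ++ st.1, st.2 >>> (2 : Nat))         -- substring = basis + substring; int_substring >>= 2

def recover_substring (int_substring : Int) (l : Int) : String :=
  String.ofList ((PySem.List.pyRange 0 l 1).foldl pvStepA (([] : List Char), int_substring)).1

-- ===== PORT B =====
-- hand port of format(m, '0{w}b') for 0 ≤ m < 2^w (the only use below: m is the
-- masked value): the zero-padded binary rendering, MSB first — the character at
-- position i is bit number w-1-i of m
def pvFormatBin (m : Nat) (w : Nat) : List Char :=
  (List.range w).map (fun i => if m / 2 ^ (w - 1 - i) % 2 = 1 then '1' else '0')

def pvPair : PySem.Dict String String :=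
  PySem.Dict.ofList [("00", "A"), ("01", "C"), ("10", "G"), ("11", "T")]

-- Source B's while loop over the index i (out.append(pair[bits[i] + bits[i+1]]);
-- i += 2), ported as structural recursion consuming two characters per step
-- (advancing i by 2 = dropping two characters).  The single-character case and
-- the .getD "" default are unreachable here (bits has even length and only
-- '0'/'1' characters, so neither bits[i+1] nor the dict lookup ever raises)
def pvPairs : List Char → List String
  | [] => []
  | [c] => [(PySem.Dict.get? pvPair (String.ofList [c])).getD ""]
  | c1 :: c2 :: rest =>
      ((PySem.Dict.get? pvPair (String.ofList [c1, c2])).getD "") :: pvPairs rest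

def recover_substring_alt (int_substring : Int) (l : Int) : String :=
  if l ≤ 0 then ""
  else String.join (pvPairs (pvFormatBin
    (PySem.Int.band int_substring (2 ^ (2 * l.toNat) - 1)).toNat (2 * l.toNat)))

-- ===== PRECONDITION & SPEC =====
def Spec_recover_substring (int_substring : Int) (l : Int) (out : String) : Prop := out = recover_substring_alt int_substring l
instance (int_substring : Int) (l : Int) (out : String) : Decidable (Spec_recover_substring int_substring l out) := by unfold Spec_recover_substring; infer_instance

-- ===== CLAIM (what is proved, stated in full; the proofs are below) =====
def Claim_equal_recover_substring : Prop := ∀ (int_substring : Int) (l : Int), Dom_recover_substring int_substring l → Spec_recover_substring int_substring l (recover_substring int_substring l)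

-- ===== LEMMAS AND PROOFS =====

-- proof-side characterisation: the base-4 digits of m (k of them, most significant first)
def pvTable : List Char := ['A', 'C', 'G', 'T']

def pvGoAlt : Int → Nat → List Char
  | _, 0 => []
  | m, k+1 => pvGoAlt (PySem.Int.floordiv m 4) k
                ++ [PySem.List.pyGetD pvTable (PySem.Int.mod m 4) 'A']

-- the same digits, on the Nat side
def pvGoN : Nat → Nat → List Char
  | _, 0 => []
  | m, k+1 => pvGoN (m / 4) k ++ [PySem.List.pyGetD pvTable ((m % 4 : Nat) : Int) 'A']

-- Python's  n & 3  is  n mod 4  (floor mod), for every integer n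
lemma pv_band_three (n : Int) : PySem.Int.band n 3 = PySem.Int.mod n 4 := by
  rw [PySem.Int.mod_eq_emod_of_pos (by norm_num)]
  by_cases h : 0 ≤ n
  · rw [PySem.Int.band_of_nonneg h (by norm_num)]
    rw [show ((3:Int).toNat) = 3 from rfl, show (3:Nat) = 2^2-1 from rfl,
       Nat.and_two_pow_sub_one_eq_mod _ 2]
    omega
  · simp only [PySem.Int.band, if_pos (by norm_num : (0:Int) ≤ 3), if_neg h,
      show ((3:Int).toNat) = 3 from rfl]
    rw [show (3:Nat) = 2^2-1 from rfl, Nat.and_comm, Nat.and_two_pow_sub_one_eq_mod _ 2]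
    have h4 : (-n-1).toNat % 2^2 < 4 := Nat.mod_lt _ (by norm_num)
    omega

-- Python's  n >> 2  is floor division by 4
lemma pv_shift_two (n : Int) : n >>> (2:Nat) = PySem.Int.floordiv n 4 := by
  rw [PySem.Int.floordiv_eq_ediv_of_pos (by norm_num), Int.shiftRight_eq_div_pow]
  norm_num

lemma pv_mod_mul_div (n : Int) (k : Nat) : n % (4 * 4 ^ k) / 4 = n / 4 % 4 ^ k := by
  have h1 : n % (4 * 4 ^ k) = n - (4 ^ k * (n / (4 * 4 ^ k))) * 4 := by
    rw [Int.emod_def]; ring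
  have h2 : n / 4 / 4 ^ k = n / (4 * 4 ^ k) := Int.ediv_ediv_of_nonneg (by norm_num)
  rw [h1, Int.sub_mul_ediv_right _ _ (by norm_num), Int.emod_def, h2]

-- A's if-chain on (n & 3) produces exactly the table digit [ 'ACGT'[n mod 4] ]
lemma pv_basis_eq (n : Int) :
    (if PySem.Int.band n 3 = 0 then ['A'] else if PySem.Int.band n 3 = 1 then ['C']
     else if PySem.Int.band n 3 = 2 then ['G'] else if PySem.Int.band n 3 = 3 then ['T'] else [])
    = [PySem.List.pyGetD pvTable (PySem.Int.mod n 4) 'A'] := by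
  rw [pv_band_three]
  have h0 : 0 ≤ PySem.Int.mod n 4 := PySem.Int.mod_nonneg n (by norm_num)
  have h4 : PySem.Int.mod n 4 < 4 := PySem.Int.mod_lt n (by norm_num)
  interval_cases h : PySem.Int.mod n 4 <;> simp [pvTable, PySem.List.pyGetD, PySem.List.pyGet?, PySem.List.pyIdx?]

-- the loop invariant of A: folding A's step over any k-element list turns the
-- state (acc, n) into the digits of (n mod 4^k) prepended to acc
lemma pv_fold_eq (xs : List Int) : ∀ (n : Int) (acc : List Char),
    (xs.foldl pvStepA (acc, n)).1
      = pvGoAlt (PySem.Int.mod n (4 ^ xs.length)) xs.length ++ acc := by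
  induction xs with
  | nil => intro n acc; simp [pvGoAlt]
  | cons x t ih =>
    intro n acc
    have hlen : (x :: t).length = t.length + 1 := rfl
    rw [List.foldl_cons]
    show (t.foldl pvStepA (pvStepA (acc, n) x)).1 = _
    rw [show pvStepA (acc, n) x
        = ((if PySem.Int.band n 3 = 0 then ['A'] else if PySem.Int.band n 3 = 1 then ['C']
           else if PySem.Int.band n 3 = 2 then ['G'] else if PySem.Int.band n 3 = 3 then ['T'] else [])
          ++ acc, n >>> (2:Nat)) from rfl]
    rw [ih, pv_basis_eq, hlen]
    show _ = pvGoAlt (PySem.Int.mod n (4 ^ (t.length + 1))) (t.length + 1) ++ acc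
    rw [show pvGoAlt (PySem.Int.mod n (4 ^ (t.length + 1))) (t.length + 1)
        = pvGoAlt (PySem.Int.floordiv (PySem.Int.mod n (4 ^ (t.length + 1))) 4) t.length
            ++ [PySem.List.pyGetD pvTable (PySem.Int.mod (PySem.Int.mod n (4 ^ (t.length + 1))) 4) 'A'] from rfl]
    have hpos : (0:Int) < 4 ^ (t.length + 1) := by positivity
    have hd : PySem.Int.floordiv (PySem.Int.mod n (4 ^ (t.length + 1))) 4
        = PySem.Int.mod (n >>> (2:Nat)) (4 ^ t.length) := by
      rw [pv_shift_two, PySem.Int.mod_eq_emod_of_pos hpos,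
          PySem.Int.mod_eq_emod_of_pos (by positivity),
          PySem.Int.floordiv_eq_ediv_of_pos (by norm_num),
          PySem.Int.floordiv_eq_ediv_of_pos (by norm_num),
          show (4:Int) ^ (t.length + 1) = 4 * 4 ^ t.length by ring,
          pv_mod_mul_div]
    have hm : PySem.Int.mod (PySem.Int.mod n (4 ^ (t.length + 1))) 4 = PySem.Int.mod n 4 := by
      rw [PySem.Int.mod_eq_emod_of_pos hpos, PySem.Int.mod_eq_emod_of_pos (by norm_num),
          PySem.Int.mod_eq_emod_of_pos (by norm_num),
          show (4:Int) ^ (t.length + 1) = 4 * 4 ^ t.length by ring]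
      exact Int.emod_emod_of_dvd n ⟨4 ^ t.length, by ring⟩
    rw [hd, hm, List.append_assoc]

lemma pv_range_len (l : Int) : (PySem.List.pyRange 0 l 1).length = l.toNat := by
  by_cases h : 0 ≤ l
  · obtain ⟨m, rfl⟩ := Int.eq_ofNat_of_zero_le h
    rw [PySem.List.pyRange_zero_natCast]
    simp
  · have he : PySem.List.pyRange 0 l 1 = [] := by
      simp [PySem.List.pyRange]
      omega
    rw [he]
    simp
    omega

-- Python's  n & (2^j - 1)  is  n mod 2^j  (floor mod), for every integer n
lemma pv_band_mask (n : Int) (j : Nat) : PySem.Int.band n (2^j - 1) = PySem.Int.mod n (2^j) := by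
  have h1 : (1:Nat) ≤ 2^j := Nat.one_le_two_pow
  have hm : ((2:Int)^j - 1) = ((2^j - 1 : Nat) : Int) := by push_cast [h1]; ring
  have hP : ((2^j : Nat) : Int) = (2:Int)^j := by push_cast; ring
  rw [PySem.Int.mod_eq_emod_of_pos (by positivity), hm]
  by_cases h : 0 ≤ n
  · rw [PySem.Int.band_of_nonneg h (Int.natCast_nonneg _), Int.toNat_natCast,
        Nat.and_two_pow_sub_one_eq_mod, Int.natCast_mod, Int.toNat_of_nonneg h, hP]
  · rw [PySem.Int.band, if_neg h, if_pos (Int.natCast_nonneg _), Int.toNat_natCast,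
        Nat.and_comm, Nat.and_two_pow_sub_one_eq_mod]
    set a := (-n-1).toNat with ha
    have hA : (a : Int) = -n-1 := Int.toNat_of_nonneg (by omega)
    have hlt : a % 2^j < 2^j := Nat.mod_lt _ (by positivity)
    have hlt2 : 2^j - 1 - a % 2^j < 2^j := by omega
    have hMD' : ((a % 2^j : Nat) : Int) + ((2^j : Nat) : Int) * ((a / 2^j : Nat) : Int) = (a:Int) := by
      exact_mod_cast Nat.mod_add_div a (2^j)
    have hX : ((2^j - 1 - a % 2^j : Nat) : Int) = ((2^j : Nat) : Int) - 1 - ((a % 2^j : Nat) : Int) := by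
      push_cast [show a % 2^j ≤ 2^j - 1 by omega, h1]; ring
    rw [hP] at hMD' hX
    rw [show ((2^j - 1 - a % 2^j : Nat) : Int) = ((2^j - 1 - a % 2^j : Nat) : Int) % ((2:Int)^j) from
      (Int.emod_eq_of_lt (Int.natCast_nonneg _) (by rw [← hP]; exact_mod_cast hlt2)).symm]
    rw [Int.emod_eq_emod_iff_emod_sub_eq_zero]
    exact Int.emod_eq_zero_of_dvd ⟨1 + ((a / 2^j : Nat) : Int), by linear_combination hX - hMD' - hA⟩

-- pvGoAlt at a nonnegative argument is its Nat twin
lemma pv_goAlt_natCast : ∀ (k m : Nat), pvGoAlt (↑m) k = pvGoN m k := by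
  intro k
  induction k with
  | zero => intro m; rfl
  | succ k ih =>
    intro m
    show pvGoAlt (PySem.Int.floordiv (↑m) 4) k ++ [PySem.List.pyGetD pvTable (PySem.Int.mod (↑m) 4) 'A'] = _
    rw [show PySem.Int.floordiv (↑m) 4 = ((m / 4 : Nat) : Int) from by
          exact_mod_cast PySem.Int.floordiv_natCast m 4,
        show PySem.Int.mod (↑m) 4 = ((m % 4 : Nat) : Int) from by
          exact_mod_cast PySem.Int.mod_natCast m 4,
        ih]
    rfl

-- peeling the last two bit characters off the padded rendering
lemma pv_format_succ (m k : Nat) :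
    pvFormatBin m (2*(k+1)) = pvFormatBin (m/4) (2*k) ++
      [if m % 4 / 2 = 1 then '1' else '0', if m % 2 = 1 then '1' else '0'] := by
  unfold pvFormatBin
  rw [show 2*(k+1) = (2*k+1)+1 by ring, List.range_succ, List.map_append,
      List.range_succ, List.map_append, List.append_assoc]
  congr 1
  · apply List.map_congr_left
    intro i hi
    rw [List.mem_range] at hi
    have he : 2*k+1+1-1-i = (2*k-1-i)+2 := by omega
    have hd : m / 2 ^ ((2*k-1-i)+2) = m / 4 / 2 ^ (2*k-1-i) := by
      rw [Nat.div_div_eq_div_mul, pow_add]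
      ring_nf
    rw [he, hd]
  · have h1 : 2*k+1+1-1-(2*k) = 1 := by omega
    have h2 : 2*k+1+1-1-(2*k+1) = 0 := by omega
    simp only [List.map_cons, List.map_nil, h1, h2, pow_one, pow_zero, Nat.div_one]
    have hq : m / 2 % 2 = m % 4 / 2 := by omega
    rw [hq]
    rfl

-- Source B's pair loop consumes an even-length prefix before the final pair
lemma pv_pairs_append (xs : List Char) (a b : Char) (h : xs.length % 2 = 0) :
    pvPairs (xs ++ [a, b])
      = pvPairs xs ++ [(PySem.Dict.get? pvPair (String.ofList [a, b])).getD ""] := by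
  induction xs using pvPairs.induct with
  | case1 => rfl
  | case2 c => simp at h
  | case3 c1 c2 rest ih =>
    have hr : rest.length % 2 = 0 := by simp at h; omega
    show _ :: pvPairs (rest ++ [a, b]) = _
    rw [ih hr]
    rfl

-- the pair table applied to the two bit characters of r = m % 4 is the digit table
lemma pv_pairs_format : ∀ (k m : Nat),
    pvPairs (pvFormatBin m (2*k)) = (pvGoN m k).map (fun c => String.ofList [c]) := by
  intro k
  induction k with
  | zero => intro m; rfl
  | succ k ih =>
    intro m
    rw [pv_format_succ, pv_pairs_append _ _ _ (by simp [pvFormatBin]), ih]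
    show _ = ((pvGoN (m/4) k) ++ [PySem.List.pyGetD pvTable ((m % 4 : Nat) : Int) 'A']).map _
    rw [List.map_append]
    congr 1
    have h4 : m % 4 < 4 := Nat.mod_lt _ (by norm_num)
    have h2 : m % 2 = m % 4 % 2 := by omega
    rw [h2]
    interval_cases h : m % 4 <;> rfl

lemma pv_join_aux (cs : List Char) : ∀ acc : List Char,
    (cs.map (fun c => String.ofList [c])).foldl (· ++ ·) (String.ofList acc) = String.ofList (acc ++ cs) := by
  induction cs with
  | nil => intro acc; simp
  | cons c rest ih =>
    intro acc
    rw [List.map_cons, List.foldl_cons,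
        show String.ofList acc ++ String.ofList [c] = String.ofList (acc ++ [c]) from by simp,
        ih, List.append_assoc]
    rfl

lemma pv_join_singletons (cs : List Char) :
    String.join (cs.map (fun c => String.ofList [c])) = String.ofList cs := by
  have := pv_join_aux cs []
  simpa [String.join] using this

-- ===== VERDICT (by name: the statement is the Claim_ definition above) =====
theorem recover_substring_spec : Claim_equal_recover_substring := by
  intro n l _
  show recover_substring n l = recover_substring_alt n l
  unfold recover_substring recover_substring_alt
  rw [pv_fold_eq, pv_range_len, List.append_nil]
  by_cases h : l ≤ 0
  · rw [if_pos h, show l.toNat = 0 by omega]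
    rfl
  · rw [if_neg h]
    have hM : PySem.Int.band n (2 ^ (2 * l.toNat) - 1) = PySem.Int.mod n (4 ^ l.toNat) := by
      rw [pv_band_mask]
      congr 1
      rw [pow_mul]
      norm_num
    have h0 : 0 ≤ PySem.Int.mod n (4 ^ l.toNat) := PySem.Int.mod_nonneg n (by positivity)
    rw [hM, pv_pairs_format, pv_join_singletons, ← pv_goAlt_natCast, Int.toNat_of_nonneg h0]
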